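-- pv_equiv track=rewrite | github.com/JacobTyo/Valla | valla/utils/torched_adhom_preproc.py | count_tokens_and_characters
-- ===== SOURCE A (Python) =====
-- def count_tokens_and_characters(doc):
--     dict_chr_counts, dict_token_counts = {}, {}
--     for sent in doc:
--         tokens = sent.split()
--         for token in tokens:
--             for chr in token:
--                 if chr not in dict_chr_counts:
--                     dict_chr_counts[chr] = 0
--                 dict_chr_counts[chr] += 1
--             if token not in dict_token_counts:
--                 dict_token_counts[token] = 0
--             dict_token_counts[token] += 1
--     return dict_chr_counts, dict_token_counts
-- ===== SOURCE B (Python) =====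
-- def count_tokens_and_characters(doc):
--     toks = [t for sent in doc for t in sent.split()]
--     chars = ''.join(toks)
--     char_counts = {c: chars.count(c) for c in dict.fromkeys(chars)}
--     srt = sorted(toks)
--     runs = {}
--     i = 0
--     while i < len(srt):
--         j = i
--         while j < len(srt) and srt[j] == srt[i]:
--             j += 1
--         runs[srt[i]] = j - i
--         i = j
--     token_counts = {t: runs[t] for t in dict.fromkeys(toks)}
--     return char_counts, token_counts
-- ===== Notes on version B (the rewrite author's own statement) =====
-- stated objective: alternative
-- what changed: Removes the incremental dict mutation: B flattens the tokens once, counts characters by per-distinct-char full scans over the joined string, and counts tokens by sorting and run-length-grouping the sorted list, finally assembling both dicts by comprehensions over dict.fromkeys (first-occurrence key order).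
import Mathlib
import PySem

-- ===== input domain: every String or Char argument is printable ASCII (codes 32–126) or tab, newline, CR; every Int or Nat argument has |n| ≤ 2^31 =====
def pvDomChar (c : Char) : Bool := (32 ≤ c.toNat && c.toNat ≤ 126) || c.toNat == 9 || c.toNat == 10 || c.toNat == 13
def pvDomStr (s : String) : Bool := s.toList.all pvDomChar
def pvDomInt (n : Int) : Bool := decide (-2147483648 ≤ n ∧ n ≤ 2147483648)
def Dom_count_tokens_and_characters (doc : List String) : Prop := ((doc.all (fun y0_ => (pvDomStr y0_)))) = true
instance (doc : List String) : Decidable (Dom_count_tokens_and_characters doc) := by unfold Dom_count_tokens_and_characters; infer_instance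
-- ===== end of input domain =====

-- B removes A's incremental dict mutation: characters are counted by per-distinct-char
-- scans, tokens by sort + run-length grouping (alternative decomposition, not faster).

-- ===== PORT A =====
-- 'if k not in d: d[k] = 0' then 'd[k] += 1'
def pvBump (d : PySem.Dict String Int) (k : String) : PySem.Dict String Int :=
  let d1 := if d.contains k then d else d.insert k 0
  d1.insert k (d1.getD k 0 + 1)

def count_tokens_and_characters (doc : List String) : (List (String × Int)) × (List (String × Int)) :=
  let st := doc.foldl (fun (st : PySem.Dict String Int × PySem.Dict String Int) sent =>
      (PySem.Str.split₀ sent).foldl (fun st token =>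
        let c := token.toList.foldl (fun c ch => pvBump c (String.ofList [ch])) st.1
        (c, pvBump st.2 token)) st)
    (PySem.Dict.empty, PySem.Dict.empty)
  (st.1.items, st.2.items)

-- ===== PORT B =====
-- the two nested whiles of Source B: take the run of elements equal to the head, record its
-- length, continue on the rest ('i = j')
def pvRuns : List String → PySem.Dict String Int → PySem.Dict String Int
  | [], d => d
  | x :: xs, d =>
      pvRuns (xs.dropWhile (· == x)) (d.insert x (((xs.takeWhile (· == x)).length + 1 : Nat)))
termination_by l _ => l.length
decreasing_by
  have := List.length_dropWhile_le (· == x) xs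
  simp only [List.length_cons]; omega

-- toks = [t for sent in doc for t in sent.split()]; chars = ''.join(toks) iterated as
-- 1-char strings (for a 1-char needle str.count is exactly the character count);
-- dict.fromkeys = PySem.List.dedup (first occurrences, in order); runs[t] is ported as
-- getD t 0 — exact, since every token of toks has a run entry (sorted is a permutation).
def count_tokens_and_characters_alt (doc : List String) : (List (String × Int)) × (List (String × Int)) :=
  let toks := doc.flatMap (fun sent => PySem.Str.split₀ sent)
  let chars := toks.flatMap (fun t => t.toList.map (fun c => String.ofList [c]))
  let runs := pvRuns (PySem.List.sorted toks (fun x => x) false) PySem.Dict.empty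
  ((PySem.List.dedup chars).map (fun c => (c, (chars.count c : Int))),
   (PySem.List.dedup toks).map (fun t => (t, runs.getD t 0)))

-- ===== PRECONDITION & SPEC =====
def Spec_count_tokens_and_characters (doc : List String) (out : (List (String × Int)) × (List (String × Int))) : Prop := out = count_tokens_and_characters_alt doc
instance (doc : List String) (out : (List (String × Int)) × (List (String × Int))) : Decidable (Spec_count_tokens_and_characters doc out) := by unfold Spec_count_tokens_and_characters; infer_instance

-- ===== CLAIM (what is proved, stated in full; the proofs are below) =====
def Claim_equal_count_tokens_and_characters : Prop := ∀ (doc : List String), Dom_count_tokens_and_characters doc → Spec_count_tokens_and_characters doc (count_tokens_and_characters doc)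

-- ===== LEMMAS AND PROOFS =====

theorem pvDict_getD_of_not_contains (d : PySem.Dict String Int) (k : String)
    (h : d.contains k = false) : d.getD k 0 = 0 := by
  have hn : d.get? k = none := (PySem.Dict.get?_eq_none_iff_contains d k).mpr h
  simp [PySem.Dict.getD, hn]

-- A's two-step bump is a single Counter-style update
theorem pvBump_eq (d : PySem.Dict String Int) (k : String) :
    pvBump d k = d.insert k (d.getD k 0 + 1) := by
  unfold pvBump
  by_cases h : d.contains k = true
  · simp [h]
  · have h' : d.contains k = false := by simpa using h
    simp only [h', Bool.false_eq_true, if_false]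
    rw [PySem.Dict.getD_insert_self, pvDict_getD_of_not_contains d k h',
        PySem.Dict.insert_insert_self]

theorem pvBump_funext : pvBump = fun d k => d.insert k (d.getD k 0 + 1) :=
  funext fun d => funext fun k => pvBump_eq d k

-- a fold whose step updates the two components independently splits into two folds
theorem pvFoldl_pair {α β γ : Type} (f : α → γ → α) (g : β → γ → β)
    (l : List γ) (a : α) (b : β) :
    l.foldl (fun p x => (f p.1 x, g p.2 x)) (a, b) = (l.foldl f a, l.foldl g b) := by
  induction l generalizing a b with
  | nil => rfl
  | cons x xs ih => simp [List.foldl_cons, ih]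

-- folding each g x in turn is folding the flattened list
theorem pvFoldl_flatMap {α β γ : Type} (g : α → List β) (f : γ → β → γ)
    (l : List α) (init : γ) :
    l.foldl (fun acc x => (g x).foldl f acc) init = (l.flatMap g).foldl f init := by
  induction l generalizing init with
  | nil => rfl
  | cons x xs ih => simp [List.flatMap_cons, List.foldl_append, ih]

-- the fused pair-state loop of A splits into the char fold and the token fold
theorem pvFused_split (doc : List String)
    (a b : PySem.Dict String Int) :
    doc.foldl (fun st sent =>
        (PySem.Str.split₀ sent).foldl (fun st token =>
          (token.toList.foldl (fun c ch => pvBump c (String.ofList [ch])) st.1,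
           pvBump st.2 token)) st) (a, b)
    = (doc.foldl (fun d sent =>
          (PySem.Str.split₀ sent).foldl
            (fun d token => token.toList.foldl (fun c ch => pvBump c (String.ofList [ch])) d) d) a,
       doc.foldl (fun d sent =>
          (PySem.Str.split₀ sent).foldl (fun d token => pvBump d token) d) b) := by
  induction doc generalizing a b with
  | nil => rfl
  | cons s rest ih =>
    simp only [List.foldl_cons]
    rw [pvFoldl_pair (fun d token => token.toList.foldl (fun c ch => pvBump c (String.ofList [ch])) d)
          (fun d token => pvBump d token) (PySem.Str.split₀ s) a b]
    exact ih _ _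

theorem pvCharstep_eq :
    (fun (d : PySem.Dict String Int) (token : String) =>
        token.toList.foldl (fun c ch => pvBump c (String.ofList [ch])) d)
    = (fun d token => (token.toList.map (fun c => String.ofList [c])).foldl pvBump d) := by
  funext d token
  rw [List.foldl_map]

-- A's incremental tally over a flat list is Counter, whose items are dedup + count
theorem pvTally_items (xs : List String) :
    (xs.foldl pvBump PySem.Dict.empty).items
      = (PySem.List.dedup xs).map (fun k => (k, (xs.count k : Int))) := by
  rw [pvBump_funext, PySem.Dict.foldl_insert_getD_add_one_eq_counter,
      PySem.Dict.items_counter]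
  simp

-- run-length grouping of a (≤)-sorted list: each key's run length is its count
theorem pvRuns_getD (l : List String) (d : PySem.Dict String Int) (t : String) :
    l.Pairwise (· ≤ ·) →
    (pvRuns l d).getD t 0 = if t ∈ l then (l.count t : Int) else d.getD t 0 := by
  induction l, d using pvRuns.induct with
  | case1 d => intro _; simp [pvRuns]
  | case2 x xs d ih =>
    intro hs
    have hx : ∀ e ∈ xs, x ≤ e := fun e he => (List.pairwise_cons.mp hs).1 e he
    have hxs : xs.Pairwise (· ≤ ·) := (List.pairwise_cons.mp hs).2
    set run := xs.takeWhile (fun z => z == x) with hrun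
    set rest := xs.dropWhile (fun z => z == x) with hrest
    have hsplit : run ++ rest = xs := List.takeWhile_append_dropWhile
    have hrestsorted : rest.Pairwise (· ≤ ·) :=
      List.Pairwise.sublist (hsplit ▸ List.sublist_append_right run rest) hxs
    have hrunx : ∀ e ∈ run, e = x := fun e he => by
      have := List.mem_takeWhile_imp he; simpa using this
    have hxrest : x ∉ rest := by
      intro hmem
      have hne : rest ≠ [] := List.ne_nil_of_mem hmem
      obtain ⟨y, ys, hrm⟩ := List.exists_cons_of_ne_nil hne
      have h0 : 0 < (List.dropWhile (fun z => z == x) xs).length := by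
        rw [← hrest, hrm]; simp
      have hy := List.dropWhile_get_zero_not (p := fun z => z == x) xs h0
      have hy' : (y == x) ≠ true := by
        have hget : (List.dropWhile (fun z => z == x) xs).get ⟨0, h0⟩ = y := by
          simp [← hrest, hrm]
        rw [hget] at hy; exact hy
      have hyx : y ≠ x := by simpa using hy'
      have hymem : y ∈ xs := by
        rw [← hsplit, hrm]; exact List.mem_append_right run (by simp)
      have hxy : x < y := lt_of_le_of_ne (hx y hymem) (Ne.symm hyx)
      have hms := hrestsorted
      rw [hrm] at hms hmem
      rcases List.mem_cons.mp hmem with h | h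
      · exact hyx h.symm
      · exact absurd (lt_of_lt_of_le hxy ((List.pairwise_cons.mp hms).1 x h)) (lt_irrefl x)
    simp only [pvRuns]
    rw [ih hrestsorted]
    by_cases htx : t = x
    · subst htx
      have hcr : run.count t = run.length :=
        List.count_eq_length.mpr (fun b hb => (hrunx b hb).symm)
      have hcrest : rest.count t = 0 := List.count_eq_zero.mpr hxrest
      have hcxs : xs.count t = run.length := by
        rw [← hsplit, List.count_append, hcr, hcrest]
        omega
      rw [if_neg hxrest, PySem.Dict.getD_insert, if_pos rfl,
          if_pos (by simp : t ∈ t :: xs)]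
      have hcnt : (t :: xs).count t = run.length + 1 := by
        simp [hcxs]
      rw [hcnt]
    · have hct : run.count t = 0 :=
        List.count_eq_zero.mpr (fun hmem => htx (hrunx t hmem))
      by_cases hmem : t ∈ x :: xs
      · have hmemxs : t ∈ xs := by
          rcases List.mem_cons.mp hmem with h | h
          · exact absurd h htx
          · exact h
        have hmemrest : t ∈ rest := by
          rcases List.mem_append.mp (hsplit ▸ hmemxs : t ∈ run ++ rest) with h | h
          · exact absurd (hrunx t h) htx
          · exact h
        rw [if_pos hmemrest, if_pos hmem]
        have h1 : xs.count t = rest.count t := by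
          rw [← hsplit, List.count_append, hct]
          omega
        have hc : (x :: xs).count t = rest.count t := by
          simp [h1, Ne.symm htx]
        rw [hc]
      · have hmemrest : t ∉ rest := fun h =>
          hmem (List.mem_cons_of_mem x (hsplit ▸ List.mem_append_right run h))
        rw [if_neg hmemrest, if_neg hmem, PySem.Dict.getD_insert, if_neg htx]

theorem count_tokens_and_characters_spec : Claim_equal_count_tokens_and_characters := by
  intro doc _
  unfold Spec_count_tokens_and_characters
  simp only [count_tokens_and_characters, count_tokens_and_characters_alt]
  rw [pvFused_split]
  rw [pvFoldl_flatMap (fun sent => PySem.Str.split₀ sent)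
        (fun d token => token.toList.foldl (fun c ch => pvBump c (String.ofList [ch])) d)]
  rw [pvFoldl_flatMap (fun sent => PySem.Str.split₀ sent) (fun d token => pvBump d token)]
  rw [show (fun (d : PySem.Dict String Int) (token : String) => pvBump d token) = pvBump from rfl]
  conv_lhs => rw [pvCharstep_eq]
  rw [pvFoldl_flatMap (fun (t : String) => t.toList.map (fun c => String.ofList [c])) pvBump]
  rw [pvTally_items, pvTally_items]
  refine Prod.ext rfl ?_
  simp only
  apply List.map_congr_left
  intro t ht
  have htm : t ∈ doc.flatMap (fun sent => PySem.Str.split₀ sent) := by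
    exact (PySem.List.mem_dedup _ t).mp ht
  have hperm : (PySem.List.sorted (doc.flatMap (fun sent => PySem.Str.split₀ sent)) (fun x => x) false).Perm
      (doc.flatMap (fun sent => PySem.Str.split₀ sent)) := PySem.List.sorted_perm _ _ _
  have hsorted : (PySem.List.sorted (doc.flatMap (fun sent => PySem.Str.split₀ sent)) (fun x => x) false).Pairwise (· ≤ ·) := by
    have := PySem.List.sorted_pairwise (doc.flatMap (fun sent => PySem.Str.split₀ sent)) (fun x => x)
    simpa using this
  rw [pvRuns_getD _ _ _ hsorted]
  have hmemsorted : t ∈ PySem.List.sorted (doc.flatMap (fun sent => PySem.Str.split₀ sent)) (fun x => x) false :=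
    hperm.mem_iff.mpr htm
  rw [if_pos hmemsorted, hperm.count_eq]
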